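-- pv_equiv track=rewrite | github.com/StarryNight-2022/Oracle | profile/GSM8K/scripts/plot_output_tokens_vs_runtime_comparison.py | pick_y_field
-- ===== SOURCE A (Python) =====
-- from typing import List, Tuple, Dict
--
-- def pick_y_field(records: List[dict], preferred: str | None = None) -> str | None:
--     """在记录中选择 y 字段。优先使用 preferred，否则尝试以下候选。
--     候选：duration_seconds, runtime, runtime_seconds, elapsed, time。
--     若均不存在返回 None。
--     """
--     if not records:
--         return preferred
--     if preferred and any((preferred in r) and (r.get(preferred) is not None) for r in records):
--         return preferred
--     candidates = ["duration_seconds", "runtime", "runtime_seconds", "elapsed", "time"]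
--     for c in candidates:
--         if any((c in r) and (r.get(c) is not None) for r in records):
--             return c
--     return preferred
-- ===== SOURCE B (Python) =====
-- def pick_y_field(records, preferred=None):
--     if not records:
--         return preferred
--     present = set()
--     for r in records:
--         for k, v in r.items():
--             if v is not None:
--                 present.add(k)
--     order = ([preferred] if preferred else []) + [
--         "duration_seconds", "runtime", "runtime_seconds", "elapsed", "time"]
--     for k in order:
--         if k in present:
--             return k
--     return preferred
-- ===== Notes on version B (the rewrite author's own statement) =====
-- stated objective: simpler
-- what changed: Replaces the per-candidate repeated scans over all records with a single pass that builds a set of keys having a non-None value somewhere, followed by one lookup pass over the ordered candidate list.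
import Mathlib
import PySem

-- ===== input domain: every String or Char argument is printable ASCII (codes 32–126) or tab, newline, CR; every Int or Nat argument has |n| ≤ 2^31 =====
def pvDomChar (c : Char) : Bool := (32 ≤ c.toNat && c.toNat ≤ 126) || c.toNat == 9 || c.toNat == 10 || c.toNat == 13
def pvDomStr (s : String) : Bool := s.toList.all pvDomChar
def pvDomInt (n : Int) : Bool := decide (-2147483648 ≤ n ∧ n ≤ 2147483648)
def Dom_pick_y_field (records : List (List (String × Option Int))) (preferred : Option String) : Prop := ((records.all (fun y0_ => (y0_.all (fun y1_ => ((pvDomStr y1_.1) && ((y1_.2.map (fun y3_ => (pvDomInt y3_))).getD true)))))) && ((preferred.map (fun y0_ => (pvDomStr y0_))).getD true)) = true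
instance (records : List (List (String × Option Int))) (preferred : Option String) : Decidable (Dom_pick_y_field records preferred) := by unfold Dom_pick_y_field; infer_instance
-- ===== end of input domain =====

-- B builds the set of keys that carry a non-None value in one pass, then scans the ordered candidate list once (objective: simpler).

-- ===== PORT A =====
-- (c in r) and (r.get(c) is not None), with r the Python dict built from the pair list
def pvRecHas (r : List (String × Option Int)) (c : String) : Bool :=
  (PySem.Dict.ofList r).contains c && (((PySem.Dict.ofList r).get? c).getD none).isSome

-- the 'for c in candidates: if any(...): return c' loop; falls through to 'return preferred'
def pvPickLoop (records : List (List (String × Option Int))) (cands : List String)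
    (preferred : Option String) : Option String :=
  match cands with
  | [] => preferred
  | c :: rest =>
      if records.any (fun r => pvRecHas r c) then some c else pvPickLoop records rest preferred

def pick_y_field (records : List (List (String × Option Int))) (preferred : Option String) : Option String :=
  if records.isEmpty then preferred
  else
    match preferred with
    | some p =>
        if (!(p == "")) && records.any (fun r => pvRecHas r p) then some p
        else pvPickLoop records ["duration_seconds", "runtime", "runtime_seconds", "elapsed", "time"] preferred
    | none => pvPickLoop records ["duration_seconds", "runtime", "runtime_seconds", "elapsed", "time"] preferred

-- ===== PORT B =====
-- one pass over all records collecting every key whose value is not None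
def pvPresent (records : List (List (String × Option Int))) : PySem.Set String :=
  records.foldl
    (fun s r =>
      (PySem.Dict.ofList r).items.foldl
        (fun s kv => if kv.2.isSome then PySem.Set.add s kv.1 else s) s)
    PySem.Set.empty

def pick_y_field_alt (records : List (List (String × Option Int))) (preferred : Option String) : Option String :=
  if records.isEmpty then preferred
  else
    let present := pvPresent records
    let order :=
      (match preferred with
       | some p => if p == "" then [] else [p]
       | none => []) ++ ["duration_seconds", "runtime", "runtime_seconds", "elapsed", "time"]
    match order.find? (fun k => PySem.Set.contains present k) with
    | some k => some k
    | none => preferred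

-- ===== PRECONDITION & SPEC =====
def Spec_pick_y_field (records : List (List (String × Option Int))) (preferred : Option String) (out : Option String) : Prop := out = pick_y_field_alt records preferred
instance (records : List (List (String × Option Int))) (preferred : Option String) (out : Option String) : Decidable (Spec_pick_y_field records preferred out) := by unfold Spec_pick_y_field; infer_instance

-- ===== CLAIM (what is proved, stated in full; the proofs are below) =====
def Claim_equal_pick_y_field : Prop := ∀ (records : List (List (String × Option Int))) (preferred : Option String), Dom_pick_y_field records preferred → Spec_pick_y_field records preferred (pick_y_field records preferred)

-- ===== LEMMAS AND PROOFS =====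

-- membership in the inner fold over one record's items
theorem pv_mem_inner (items : List (String × Option Int)) (s : PySem.Set String) (y : String) :
    y ∈ items.foldl (fun s kv => if kv.2.isSome then PySem.Set.add s kv.1 else s) s ↔
      y ∈ s ∨ ∃ v, (y, some v) ∈ items := by
  induction items generalizing s with
  | nil => simp
  | cons kv rest ih =>
    obtain ⟨k, v⟩ := kv
    cases v with
    | none => simp [ih]
    | some w =>
      simp only [List.foldl_cons, Option.isSome_some, if_true, ih, PySem.Set.mem_add,
        List.mem_cons, Prod.mk.injEq]
      constructor
      · rintro (⟨h | rfl⟩ | ⟨v, hv⟩)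
        · exact Or.inl h
        · exact Or.inr ⟨w, Or.inl ⟨rfl, rfl⟩⟩
        · exact Or.inr ⟨v, Or.inr hv⟩
      · rintro (h | ⟨v, ⟨rfl, h2⟩ | h'⟩)
        · exact Or.inl (Or.inl h)
        · exact Or.inl (Or.inr rfl)
        · exact Or.inr ⟨v, h'⟩

theorem pv_mem_present (records : List (List (String × Option Int))) (y : String) :
    y ∈ pvPresent records ↔ ∃ r ∈ records, ∃ v, (y, some v) ∈ (PySem.Dict.ofList r).items := by
  unfold pvPresent
  have h : ∀ (rs : List (List (String × Option Int))) (s : PySem.Set String),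
      y ∈ rs.foldl (fun s r => (PySem.Dict.ofList r).items.foldl
          (fun s kv => if kv.2.isSome then PySem.Set.add s kv.1 else s) s) s ↔
        y ∈ s ∨ ∃ r ∈ rs, ∃ v, (y, some v) ∈ (PySem.Dict.ofList r).items := by
    intro rs
    induction rs with
    | nil => simp
    | cons r rest ih =>
      intro s
      simp only [List.foldl_cons, ih, pv_mem_inner]
      constructor
      · rintro (⟨h | h⟩ | ⟨r', hr', hv⟩)
        · exact Or.inl h
        · exact Or.inr ⟨r, by simp, h⟩
        · exact Or.inr ⟨r', by simp [hr'], hv⟩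
      · rintro (h | ⟨r', hr', hv⟩)
        · exact Or.inl (Or.inl h)
        · rcases List.mem_cons.mp hr' with rfl | h'
          · exact Or.inl (Or.inr hv)
          · exact Or.inr ⟨r', h', hv⟩
  simpa using h records PySem.Set.empty

theorem pv_recHas_iff (r : List (String × Option Int)) (c : String) :
    pvRecHas r c = true ↔ ∃ v, (PySem.Dict.ofList r).get? c = some (some v) := by
  unfold pvRecHas
  rw [PySem.Dict.contains_eq_isSome_get?]
  cases (PySem.Dict.ofList r).get? c with
  | none => simp
  | some o => cases o <;> simp

theorem pv_contains_present (records : List (List (String × Option Int))) (c : String) :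
    PySem.Set.contains (pvPresent records) c = records.any (fun r => pvRecHas r c) := by
  rw [Bool.eq_iff_iff]
  simp only [PySem.Set.contains_iff, pv_mem_present, List.any_eq_true, pv_recHas_iff]
  constructor
  · rintro ⟨r, hr, v, hv⟩
    exact ⟨r, hr, v, PySem.Dict.get?_of_mem_items _ hv (PySem.Dict.nodup_keys_ofList r)⟩
  · rintro ⟨r, hr, v, hv⟩
    exact ⟨r, hr, v, PySem.Dict.mem_items_of_get?_eq_some _ hv⟩

theorem pv_loop_eq_find (records : List (List (String × Option Int)))
    (cands : List String) (preferred : Option String) :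
    pvPickLoop records cands preferred =
      (match cands.find? (fun k => records.any (fun r => pvRecHas r k)) with
       | some k => some k
       | none => preferred) := by
  induction cands with
  | nil => rfl
  | cons c rest ih =>
    rw [pvPickLoop, List.find?_cons]
    by_cases h : records.any (fun r => pvRecHas r c) = true
    · simp [h]
    · simp only [Bool.not_eq_true] at h
      simp [h, ih]


-- ===== VERDICT (by name: the statement is the Claim_ definition above) =====
theorem pick_y_field_spec : Claim_equal_pick_y_field := by
  intro records preferred _
  unfold Spec_pick_y_field pick_y_field pick_y_field_alt
  by_cases hemp : records.isEmpty
  · simp [hemp]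
  · have hpred : (fun k => PySem.Set.contains (pvPresent records) k) =
        (fun k => records.any (fun r => pvRecHas r k)) :=
      funext (pv_contains_present records)
    simp only [hemp, hpred]
    cases preferred with
    | none => simpa using pv_loop_eq_find records _ none
    | some p =>
      by_cases hp : p == ""
      · simp only [hp, Bool.not_true, Bool.false_and, if_true]
        simpa using pv_loop_eq_find records _ (some p)
      · simp only [hp, Bool.not_false, Bool.true_and, Bool.false_eq_true, if_false,
          List.cons_append, List.find?_cons]
        by_cases h : records.any (fun r => pvRecHas r p) = true
        · simp [h]
        · simp only [Bool.not_eq_true] at h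
          simp only [h, Bool.false_eq_true, if_false]
          simpa [h] using pv_loop_eq_find records _ (some p)
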